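-- pv_equiv track=rewrite | github.com/phyzan/numiphy | numiphy/toolkit/tools.py | flatten_index
-- ===== SOURCE A (Python) =====
-- from typing import Callable, Literal
--
-- def prod(args):
--     '''
--     Argument
--     ------------
--     args (iterable): array of numbers
--
--     Returns
--     ------------
--     Product of numbers inside 'args'
--     '''
--     a = 1
--     for i in args:
--         a *= i
--     return a
--
-- def flatten_index(index: tuple[int], shape: tuple[int], order: Literal['F', 'C']):
--     '''
--     Arguments
--     ------------
--     index (tuple): index of multidimensional matrix
--     shape (tuple): dimensions of matrix
--     order ('F' or 'C'): If the left index increases fastest, then 'F'. If the right index increases fastest, then 'C'.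
--
--     Returns
--     ------------
--     index (int) of corresponding flattened array
--     '''
--     if len(index) != len(shape):
--         raise ValueError("'Shape' and 'index' shape mismatch")
--     nd = len(shape)
--     res = 0
--     if order == 'C':
--         for k in range(nd):
--             res += index[k]*prod(shape[k+1:])
--     else:
--         for k in range(nd):
--             res += index[k]*prod(shape[:k])
--     return res
-- ===== SOURCE B (Python) =====
-- def flatten_index(index, shape, order):
--     if len(index) != len(shape):
--         raise ValueError("'Shape' and 'index' shape mismatch")
--     res = 0
--     stride = 1
--     if order == 'C':
--         for i, s in zip(reversed(index), reversed(shape)):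
--             res += i * stride
--             stride *= s
--     else:
--         for i, s in zip(index, shape):
--             res += i * stride
--             stride *= s
--     return res
-- ===== Notes on version B (the rewrite author's own statement) =====
-- stated objective: faster
-- what changed: Single pass maintaining a running stride product (reversed traversal for 'C' order) instead of recomputing prod of a shape slice for every axis.
import Mathlib
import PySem

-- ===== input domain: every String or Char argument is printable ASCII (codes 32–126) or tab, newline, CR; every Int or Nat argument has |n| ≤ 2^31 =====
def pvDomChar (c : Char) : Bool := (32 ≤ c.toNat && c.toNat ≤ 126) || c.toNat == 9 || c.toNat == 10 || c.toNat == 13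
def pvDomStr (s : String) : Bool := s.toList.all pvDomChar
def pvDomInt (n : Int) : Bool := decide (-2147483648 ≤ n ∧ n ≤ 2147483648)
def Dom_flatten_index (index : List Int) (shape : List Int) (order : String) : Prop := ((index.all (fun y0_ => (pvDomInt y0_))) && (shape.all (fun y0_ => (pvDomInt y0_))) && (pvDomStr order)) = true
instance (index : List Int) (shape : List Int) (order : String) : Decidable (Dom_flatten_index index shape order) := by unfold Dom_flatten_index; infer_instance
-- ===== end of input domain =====

-- B replaces A's per-axis recomputation of prod over a shape slice by a single pass with a
-- running stride product; equivalence proved on inputs with len(index) = len(shape) (else A raises ValueError).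


-- ===== PORT A =====
-- 'prod(args)': a = 1; for i in args: a *= i
def pvProdA (args : List Int) : Int := args.foldl (fun a i => a * i) 1

-- A's length-mismatch ValueError is excluded by Pre_flatten_index; inside Pre_ every index[k] is in range.
def flatten_index (index : List Int) (shape : List Int) (order : String) : Int :=
  let nd : Int := (shape.length : Int)
  if order = "C" then
    (PySem.List.pyRange 0 nd 1).foldl
      (fun res k => res + PySem.List.pyGetD index k 0 * pvProdA (PySem.List.slice shape (some (k+1)) none)) 0
  else
    (PySem.List.pyRange 0 nd 1).foldl
      (fun res k => res + PySem.List.pyGetD index k 0 * pvProdA (PySem.List.slice shape none (some k))) 0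

-- ===== PORT B =====
-- one step of B's loop: res += i*stride; stride *= s
def pvStep (p : Int × Int) (is_ : Int × Int) : Int × Int := (p.1 + is_.1 * p.2, p.2 * is_.2)

def flatten_index_alt (index : List Int) (shape : List Int) (order : String) : Int :=
  if order = "C" then
    ((index.reverse.zip shape.reverse).foldl pvStep (0, 1)).1
  else
    ((index.zip shape).foldl pvStep (0, 1)).1

-- ===== PRECONDITION & SPEC =====
-- Pre_ excludes exactly the inputs where A raises ValueError (length mismatch).
def Pre_flatten_index (index : List Int) (shape : List Int) (order : String) : Prop :=
  index.length = shape.length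
instance (index : List Int) (shape : List Int) (order : String) : Decidable (Pre_flatten_index index shape order) := by unfold Pre_flatten_index; infer_instance

def pvWitness_flatten_index : List Int × List Int × String := ([1, 2], [3, 4], "C")

def Spec_flatten_index (index : List Int) (shape : List Int) (order : String) (out : Int) : Prop := out = flatten_index_alt index shape order
instance (index : List Int) (shape : List Int) (order : String) (out : Int) : Decidable (Spec_flatten_index index shape order out) := by unfold Spec_flatten_index; infer_instance

-- ===== CLAIM (what is proved, stated in full; the proofs are below) =====
def Claim_equal_flatten_index : Prop := ∀ (index : List Int) (shape : List Int) (order : String), Dom_flatten_index index shape order → Pre_flatten_index index shape order → Spec_flatten_index index shape order (flatten_index index shape order)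

-- ===== LEMMAS AND PROOFS =====

-- A's F-order sum, written as a map-sum over Nat positions
def pvSumF (i s : List Int) : Int :=
  ((List.range s.length).map (fun k => i.getD k 0 * pvProdA (s.take k))).sum

-- A's C-order sum likewise
def pvSumC (i s : List Int) : Int :=
  ((List.range s.length).map (fun k => i.getD k 0 * pvProdA (s.drop (k+1)))).sum

theorem pvProdA_eq_prod (l : List Int) : pvProdA l = l.prod := by
  simp [pvProdA, List.prod_eq_foldl]

theorem pvSumF_cons (a b : Int) (i s : List Int) :
    pvSumF (a :: i) (b :: s) = a + b * pvSumF i s := by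
  simp only [pvSumF, List.length_cons, List.range_succ_eq_map, List.map_cons, List.sum_cons,
    List.map_map, Function.comp_def, List.getD_cons_succ, List.getD_cons_zero,
    List.take_succ_cons, List.take_zero, pvProdA_eq_prod, List.prod_cons,
    List.prod_nil, mul_one]
  rw [List.map_congr_left (fun k _ => by ring :
      ∀ k ∈ List.range s.length, i.getD k 0 * (b * (List.take k s).prod)
        = b * (i.getD k 0 * (List.take k s).prod)), List.sum_map_mul_left]

theorem pvSumC_cons (a b : Int) (i s : List Int) :
    pvSumC (a :: i) (b :: s) = a * pvProdA s + pvSumC i s := by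
  simp [pvSumC, List.range_succ_eq_map, List.map_map, Function.comp_def]

theorem pvSumF_append (i s : List Int) (a b : Int) (h : i.length = s.length) :
    pvSumF (i ++ [a]) (s ++ [b]) = pvSumF i s + a * pvProdA s := by
  induction i generalizing s with
  | nil =>
    cases s with
    | nil => simp [pvSumF, pvProdA]
    | cons y t => simp at h
  | cons x i ih =>
    cases s with
    | nil => simp at h
    | cons y t =>
      simp at h
      simp only [List.cons_append, pvSumF_cons, ih t h, pvProdA_eq_prod, List.prod_cons]
      ring

theorem pvSumC_eq_sumF_reverse (i s : List Int) (h : i.length = s.length) :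
    pvSumC i s = pvSumF i.reverse s.reverse := by
  induction i generalizing s with
  | nil =>
    cases s with
    | nil => simp [pvSumC, pvSumF]
    | cons y t => simp at h
  | cons x i ih =>
    cases s with
    | nil => simp at h
    | cons y t =>
      simp at h
      rw [pvSumC_cons, ih t h, List.reverse_cons, List.reverse_cons,
          pvSumF_append i.reverse t.reverse x y (by simp [h]), pvProdA_eq_prod,
          pvProdA_eq_prod, List.prod_reverse]
      ring

-- B's loop computes the running-stride sum
theorem pvStep_fold (i s : List Int) (r str : Int) (h : i.length = s.length) :
    ((i.zip s).foldl pvStep (r, str)).1 = r + str * pvSumF i s := by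
  induction i generalizing s r str with
  | nil =>
    cases s with
    | nil => simp [pvSumF]
    | cons y t => simp at h
  | cons x i ih =>
    cases s with
    | nil => simp at h
    | cons y t =>
      simp at h
      simp only [List.zip_cons_cons, List.foldl_cons, pvStep, ih t _ _ h, pvSumF_cons]
      ring

-- A's fold over range(nd) is the map-sum
theorem pvA_fold_F (i s : List Int) :
    (PySem.List.pyRange 0 (s.length : Int) 1).foldl
      (fun res k => res + PySem.List.pyGetD i k 0 * pvProdA (PySem.List.slice s none (some k))) 0
    = pvSumF i s := by
  rw [PySem.List.foldl_add]
  simp [PySem.List.pyRange_one, List.map_map, pvSumF, Function.comp_def,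
        PySem.List.slice_to_natCast]

theorem pvA_fold_C (i s : List Int) :
    (PySem.List.pyRange 0 (s.length : Int) 1).foldl
      (fun res k => res + PySem.List.pyGetD i k 0 * pvProdA (PySem.List.slice s (some (k+1)) none)) 0
    = pvSumC i s := by
  rw [PySem.List.foldl_add]
  simp only [PySem.List.pyRange_one, List.map_map, Function.comp_def, zero_add,
             PySem.List.pyGetD_natCast, ← Nat.cast_add_one, PySem.List.slice_from_natCast]
  simp [pvSumC]

-- ===== VERDICT (by name: the statement is the Claim_ definition above) =====
theorem flatten_index_spec : Claim_equal_flatten_index := by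
  intro index shape order _ hpre
  unfold Spec_flatten_index flatten_index flatten_index_alt
  have hlen : index.length = shape.length := hpre
  by_cases hC : order = "C"
  · rw [if_pos hC, if_pos hC, pvA_fold_C index shape, pvStep_fold _ _ _ _ (by simp [hlen]),
        pvSumC_eq_sumF_reverse index shape hlen]
    ring
  · rw [if_neg hC, if_neg hC, pvA_fold_F index shape, pvStep_fold _ _ _ _ hlen]
    ring
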